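-- pv_equiv track=rewrite | github.com/Sondole179/apelao | matematica/polinomios.py | lista_polinomio
-- ===== SOURCE A (Python) =====
-- def lista_polinomio(lista):
--     polinomio = ""
--     for i in range(len(lista)):
--         if lista[i] != 0:
--             if lista[i] != 1 or i == 0:
--                 polinomio += f"{lista[i]}"
--             if i != 0:
--                 polinomio += "x"
--                 if i > 1:
--                     polinomio += f"^{i}"
--         if i < len(lista) - 1:
--             if lista[i+1] > 0:
--                 polinomio += " + "
--             if lista[i+1] < 0:
--                 lista[i+1] *= -1
--                 polinomio += " - "
--     return(polinomio)
-- ===== SOURCE B (Python) =====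
-- def _piece(i, c):
--     if i == 0:
--         return str(c) if c != 0 else ""
--     if c == 0:
--         return ""
--     sep = " + " if c > 0 else " - "
--     v = abs(c)
--     num = str(v) if v != 1 else ""
--     exp = f"^{i}" if i > 1 else ""
--     return sep + num + "x" + exp
--
-- def lista_polinomio(lista):
--     return "".join(_piece(i, c) for i, c in enumerate(lista))
-- ===== Notes on version B (the rewrite author's own statement) =====
-- stated objective: simpler
-- what changed: A is a stateful index loop that decides each separator by peeking at lista[i+1] and mutating negative coefficients in place; B is a pure per-term function mapped over enumerate(lista) and joined, each term carrying its own sign prefix.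
import Mathlib
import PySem

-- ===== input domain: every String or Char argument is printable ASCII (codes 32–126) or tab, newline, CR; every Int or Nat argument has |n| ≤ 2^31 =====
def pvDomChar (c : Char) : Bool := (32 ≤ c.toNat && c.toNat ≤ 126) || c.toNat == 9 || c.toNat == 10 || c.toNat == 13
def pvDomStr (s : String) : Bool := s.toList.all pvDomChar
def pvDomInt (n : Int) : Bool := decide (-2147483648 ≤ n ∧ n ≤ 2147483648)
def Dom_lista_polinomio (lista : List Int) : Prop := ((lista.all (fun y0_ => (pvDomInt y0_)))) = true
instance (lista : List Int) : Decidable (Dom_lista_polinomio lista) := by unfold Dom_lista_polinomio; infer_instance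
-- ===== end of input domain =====

-- B replaces A's stateful look-ahead loop (which mutates negative coefficients of `lista` in
-- place) by a pure per-term function joined over enumerate; equivalence is about the RETURN
-- value only — A mutates its argument, B does not.

-- ===== PORT A =====
def lista_polinomio (lista : List Int) : String :=
  ((PySem.List.pyRange 0 (lista.length : Int) 1).foldl
    (fun (st : String × List Int) (i : Int) =>
      let polinomio := st.1
      let l := st.2
      let polinomio :=
        if PySem.List.pyGetD l i 0 ≠ 0 then
          let polinomio :=
            if PySem.List.pyGetD l i 0 ≠ 1 ∨ i = 0 then
              polinomio ++ PySem.Int.toStr (PySem.List.pyGetD l i 0)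
            else polinomio
          if i ≠ 0 then
            let polinomio := polinomio ++ "x"
            if i > 1 then polinomio ++ "^" ++ PySem.Int.toStr i else polinomio
          else polinomio
        else polinomio
      if i < (lista.length : Int) - 1 then
        if PySem.List.pyGetD l (i + 1) 0 > 0 then (polinomio ++ " + ", l)
        else if PySem.List.pyGetD l (i + 1) 0 < 0 then
          (polinomio ++ " - ", PySem.List.pySetD l (i + 1) (PySem.List.pyGetD l (i + 1) 0 * -1))
        else (polinomio, l)
      else (polinomio, l))
    ("", lista)).1

-- ===== PORT B =====
def pvPiece (i : Int) (c : Int) : String :=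
  if i = 0 then (if c ≠ 0 then PySem.Int.toStr c else "")
  else if c = 0 then ""
  else
    (if c > 0 then " + " else " - ") ++
    (if (c.natAbs : Int) ≠ 1 then PySem.Int.toStr (c.natAbs : Int) else "") ++
    "x" ++ (if i > 1 then "^" ++ PySem.Int.toStr i else "")

def lista_polinomio_alt (lista : List Int) : String :=
  PySem.Str.join "" ((PySem.List.enumerate lista).map (fun ic => pvPiece ic.1 ic.2))

-- ===== PRECONDITION & SPEC =====
def Spec_lista_polinomio (lista : List Int) (out : String) : Prop := out = lista_polinomio_alt lista
instance (lista : List Int) (out : String) : Decidable (Spec_lista_polinomio lista out) := by unfold Spec_lista_polinomio; infer_instance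

-- ===== CLAIM (what is proved, stated in full; the proofs are below) =====
def Claim_equal_lista_polinomio : Prop := ∀ (lista : List Int), Dom_lista_polinomio lista → Spec_lista_polinomio lista (lista_polinomio lista)

-- ===== LEMMAS AND PROOFS =====

-- the body of A's loop, split into the term part (pvHead) and the separator/mutation part
-- (pvTail); pvStep is definitionally the port's lambda
def pvHead (pol : String) (l : List Int) (i : Int) : String :=
  if PySem.List.pyGetD l i 0 ≠ 0 then
    let pol :=
      if PySem.List.pyGetD l i 0 ≠ 1 ∨ i = 0 then pol ++ PySem.Int.toStr (PySem.List.pyGetD l i 0)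
      else pol
    if i ≠ 0 then
      let pol := pol ++ "x"
      if i > 1 then pol ++ "^" ++ PySem.Int.toStr i else pol
    else pol
  else pol

def pvTail (n : Int) (pol : String) (l : List Int) (i : Int) : String × List Int :=
  if i < n - 1 then
    if PySem.List.pyGetD l (i + 1) 0 > 0 then (pol ++ " + ", l)
    else if PySem.List.pyGetD l (i + 1) 0 < 0 then
      (pol ++ " - ", PySem.List.pySetD l (i + 1) (PySem.List.pyGetD l (i + 1) 0 * -1))
    else (pol, l)
  else (pol, l)

def pvStep (n : Int) (st : String × List Int) (i : Int) : String × List Int :=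
  pvTail n (pvHead st.1 st.2 i) st.2 i

lemma pv_A_eq_foldl (lista : List Int) :
    lista_polinomio lista =
      ((PySem.List.pyRange 0 (lista.length : Int) 1).foldl (pvStep (lista.length : Int)) ("", lista)).1 := rfl

-- the separator A appends while looking at the NEXT coefficient
def pvSep (c : Int) : String := if c > 0 then " + " else if c < 0 then " - " else ""

-- the list after A has absolved (negated-to-positive) coefficients 1..k
def pvL (lista : List Int) (k : Nat) : List Int :=
  lista.mapIdx (fun j v => if 0 < j ∧ j ≤ k then (v.natAbs : Int) else v)

-- B's output restricted to the first k terms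
def pvJ (lista : List Int) (k : Nat) : String :=
  PySem.Str.join "" ((PySem.List.enumerate (lista.take k)).map (fun ic => pvPiece ic.1 ic.2))

-- the dangling separator sitting at the end of A's accumulator after k iterations
def pvS (lista : List Int) (k : Nat) : String :=
  if 0 < k ∧ k < lista.length then pvSep (lista.getD k 0) else ""

lemma pvStrExt (x y : String) (h : x.toList = y.toList) : x = y := by
  rw [← String.ofList_toList (s := x), ← String.ofList_toList (s := y), h]

lemma pvJoin_chars_append (l : List (List Char)) (cs : List Char) :
    PySem.Chars.join [] (l ++ [cs]) = PySem.Chars.join [] l ++ cs := by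
  induction l with
  | nil => simp [PySem.Chars.join_nil, PySem.Chars.join_singleton]
  | cons h t ih =>
    cases t with
    | nil => simp [PySem.Chars.join_singleton, PySem.Chars.join_cons_cons, PySem.Chars.join_nil] at *
    | cons h2 t2 => simp only [List.cons_append, PySem.Chars.join_cons_cons] at *; simp [ih]

lemma pvJoin_append (l : List String) (s : String) :
    PySem.Str.join "" (l ++ [s]) = PySem.Str.join "" l ++ s := by
  simp only [PySem.Str.join, String.toList_empty, List.map_append, List.map_cons, List.map_nil]
  rw [pvJoin_chars_append, String.ofList_append, String.ofList_toList]

lemma pvL_length (lista : List Int) (k : Nat) : (pvL lista k).length = lista.length := by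
  simp [pvL]

lemma pvL_get (lista : List Int) (m k : Nat) (hk : k < lista.length) :
    (pvL lista m).getD k 0 = if 0 < k ∧ k ≤ m then (lista[k].natAbs : Int) else lista[k] := by
  rw [List.getD_eq_getElem _ _ (by simpa [pvL_length] using hk)]
  simp [pvL, List.getElem_mapIdx]

lemma pvL_zero (lista : List Int) : pvL lista 0 = lista := by
  apply List.ext_getElem (by simp [pvL_length])
  intro i h1 h2
  simp only [pvL, List.getElem_mapIdx]
  rw [if_neg (by omega)]

lemma pvL_succ_eq (lista : List Int) (k : Nat)
    (h : lista.length ≤ k + 1 ∨ 0 ≤ lista.getD (k + 1) 0) :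
    pvL lista k = pvL lista (k + 1) := by
  apply List.ext_getElem (by simp [pvL_length])
  intro i h1 h2
  simp only [pvL, List.getElem_mapIdx]
  by_cases hi : i = k + 1
  · subst hi
    have hlen : k + 1 < lista.length := by simpa [pvL_length] using h1
    have hv : 0 ≤ lista[k + 1] := by
      rcases h with h | h
      · omega
      · rwa [List.getD_eq_getElem _ _ hlen] at h
    rw [if_neg (by omega), if_pos (by omega)]
    omega
  · by_cases hc : 0 < i ∧ i ≤ k
    · rw [if_pos hc, if_pos (by omega)]
    · rw [if_neg hc, if_neg (by omega)]

lemma pvL_set (lista : List Int) (k : Nat) (hk : k + 1 < lista.length) :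
    (pvL lista k).set (k + 1) ((lista[k + 1].natAbs : Int)) = pvL lista (k + 1) := by
  apply List.ext_getElem (by simp [pvL_length])
  intro i h1 h2
  rw [List.getElem_set]
  by_cases hi : i = k + 1
  · subst hi
    rw [if_pos rfl]
    simp only [pvL, List.getElem_mapIdx]
    rw [if_pos (by omega)]
  · rw [if_neg (fun h => hi h.symm)]
    simp only [pvL, List.getElem_mapIdx]
    by_cases hc : 0 < i ∧ i ≤ k
    · rw [if_pos hc, if_pos (by omega)]
    · rw [if_neg hc, if_neg (by omega)]

lemma pvJ_succ (lista : List Int) (k : Nat) (hk : k < lista.length) :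
    pvJ lista (k + 1) = pvJ lista k ++ pvPiece (k : Int) lista[k] := by
  have ht : lista.take (k + 1) = lista.take k ++ [lista[k]] := by
    rw [List.take_add_one, List.getElem?_eq_getElem hk]
    rfl
  simp only [pvJ, ht, PySem.List.enumerate_append, List.map_append]
  rw [List.length_take_of_le (le_of_lt hk)]
  simp only [PySem.List.enumerate_cons, PySem.List.enumerate_nil, List.map_cons, List.map_nil,
    zero_add]
  rw [pvJoin_append]

lemma pv_read_self (lista : List Int) (k : Nat) (hk : k < lista.length) :
    PySem.List.pyGetD (pvL lista k) (k : Int) 0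
      = if 0 < k then (lista[k].natAbs : Int) else lista[k] := by
  rw [PySem.List.pyGetD_natCast, pvL_get lista k k hk]
  by_cases h0 : 0 < k
  · rw [if_pos ⟨h0, le_refl k⟩, if_pos h0]
  · rw [if_neg (by omega), if_neg h0]

lemma pv_read_next (lista : List Int) (k : Nat) (h1 : k + 1 < lista.length) :
    PySem.List.pyGetD (pvL lista k) ((k : Int) + 1) 0 = lista[k + 1] := by
  have hc : ((k : Int) + 1) = ((k + 1 : Nat) : Int) := by push_cast; ring
  rw [hc, PySem.List.pyGetD_natCast, pvL_get lista k (k + 1) h1, if_neg (by omega)]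

lemma pv_head_eq (lista : List Int) (k : Nat) (hk : k < lista.length) :
    pvHead (pvJ lista k ++ pvS lista k) (pvL lista k) (k : Int) = pvJ lista (k + 1) := by
  rw [pvJ_succ lista k hk]
  unfold pvHead
  rw [pv_read_self lista k hk]
  by_cases h0 : 0 < k
  · have hS : pvS lista k = pvSep lista[k] := by
      unfold pvS
      rw [if_pos ⟨h0, hk⟩, List.getD_eq_getElem _ _ hk]
    rw [if_pos h0, hS]
    simp only [pvPiece, pvSep]
    split_ifs <;> first | omega | (apply pvStrExt; simp [String.toList_append])
  · have hk0 : k = 0 := by omega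
    subst hk0
    have hS : pvS lista 0 = "" := by unfold pvS; rw [if_neg (by omega)]
    rw [if_neg h0, hS]
    simp only [pvPiece]
    split_ifs <;> first | omega | (apply pvStrExt; simp [String.toList_append])

lemma pv_tail_eq (lista : List Int) (k : Nat) (hk : k < lista.length) (pol : String) :
    pvTail (lista.length : Int) pol (pvL lista k) (k : Int)
      = (pol ++ pvS lista (k + 1), pvL lista (k + 1)) := by
  unfold pvTail
  by_cases h1 : k + 1 < lista.length
  · rw [if_pos (by omega), pv_read_next lista k h1]
    have hS : pvS lista (k + 1) = pvSep lista[k + 1] := by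
      unfold pvS
      rw [if_pos ⟨by omega, h1⟩, List.getD_eq_getElem _ _ h1]
    rcases lt_trichotomy lista[k + 1] 0 with hc | hc | hc
    · rw [if_neg (by omega), if_pos hc, hS]
      have hsep : pvSep lista[k + 1] = " - " := by
        unfold pvSep; rw [if_neg (by omega), if_pos hc]
      have hcast : ((k : Int) + 1) = ((k + 1 : Nat) : Int) := by push_cast; ring
      have hval : lista[k + 1] * -1 = ((lista[k + 1].natAbs : Nat) : Int) := by omega
      rw [hsep, hcast, hval, PySem.List.pySetD_natCast, pvL_set lista k h1]
    · rw [if_neg (by omega), if_neg (by omega), hS, hc]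
      have : pvSep 0 = "" := by unfold pvSep; norm_num
      rw [this, String.append_empty, pvL_succ_eq lista k
        (Or.inr (by rw [List.getD_eq_getElem _ _ h1]; omega))]
    · rw [if_pos hc, hS]
      have hsep : pvSep lista[k + 1] = " + " := by unfold pvSep; rw [if_pos hc]
      rw [hsep, pvL_succ_eq lista k (Or.inr (by rw [List.getD_eq_getElem _ _ h1]; omega))]
  · rw [if_neg (by omega)]
    have hS : pvS lista (k + 1) = "" := by unfold pvS; rw [if_neg (by omega)]
    rw [hS, String.append_empty, pvL_succ_eq lista k (Or.inl (by omega))]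

-- one iteration of A's loop advances the invariant
lemma pv_step_eq (lista : List Int) (k : Nat) (hk : k < lista.length) :
    pvStep (lista.length : Int) (pvJ lista k ++ pvS lista k, pvL lista k) (k : Int)
      = (pvJ lista (k + 1) ++ pvS lista (k + 1), pvL lista (k + 1)) := by
  unfold pvStep
  rw [show (pvJ lista k ++ pvS lista k, pvL lista k).1 = pvJ lista k ++ pvS lista k from rfl,
    show (pvJ lista k ++ pvS lista k, pvL lista k).2 = pvL lista k from rfl,
    pv_head_eq lista k hk, pv_tail_eq lista k hk]

lemma pv_inv (lista : List Int) (k : Nat) (hk : k ≤ lista.length) :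
    (PySem.List.pyRange 0 (k : Int) 1).foldl (pvStep (lista.length : Int)) ("", lista)
      = (pvJ lista k ++ pvS lista k, pvL lista k) := by
  induction k with
  | zero =>
    have : PySem.List.pyRange 0 ((0 : Nat) : Int) 1 = [] := by
      apply PySem.List.pyRange_one_eq_nil; simp
    rw [this]
    simp [List.foldl_nil, pvJ, pvS, pvL_zero, PySem.Str.join, PySem.List.enumerate_nil,
      PySem.Chars.join_nil]
  | succ k ih =>
    have hcast : ((k + 1 : Nat) : Int) = (k : Int) + 1 := by push_cast; ring
    rw [hcast, PySem.List.pyRange_one_succ_right (by positivity), List.foldl_append,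
      List.foldl_cons, List.foldl_nil, ih (by omega), pv_step_eq lista k (by omega)]

-- ===== VERDICT (by name: the statement is the Claim_ definition above) =====
theorem lista_polinomio_spec : Claim_equal_lista_polinomio := by
  intro lista _
  unfold Spec_lista_polinomio
  rw [pv_A_eq_foldl, pv_inv lista lista.length (le_refl _)]
  simp only [pvS, lt_irrefl, and_false, if_false]
  simp [pvJ, List.take_length, lista_polinomio_alt]
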